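-- pv_equiv track=rewrite | github.com/serverx-org/SERVER-X-ARCHIVES | hackerearth-vignan/IV-SEM-2022-26/ECP-week-1/sumOfabsDiff.py | sum_absolute_differences
-- ===== SOURCE A (Python) =====
-- def sum_absolute_differences(arr):
--     # Dictionary to store first and last occurrences of each integer
--     first_occurrence = {}
--     last_occurrence = {}
--     for i, num in enumerate(arr):
--         if num not in first_occurrence:
--             first_occurrence[num] = i
--         last_occurrence[num] = i
--
--     # Calculate absolute differences and sum them up
--     total_sum = 0
--     for num, first_index in first_occurrence.items():
--         last_index = last_occurrence[num]
--         total_sum += abs(last_index - first_index)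
--
--     return total_sum
-- ===== SOURCE B (Python) =====
-- def sum_absolute_differences(arr):
--     # total = sum(last-occurrence indices) - sum(first-occurrence indices),
--     # accumulated directly with seen-sets; no dicts, no final per-value loop.
--     total = 0
--     seen = set()
--     for i, v in enumerate(arr):
--         if v not in seen:
--             seen.add(v)
--             total -= i
--     seen = set()
--     for i, v in reversed(list(enumerate(arr))):
--         if v not in seen:
--             seen.add(v)
--             total += i
--     return total
-- ===== Notes on version B (the rewrite author's own statement) =====
-- stated objective: alternative
-- what changed: Replaced the two per-value index dicts and the final items loop by direct signed accumulation: a forward pass with a seen-set subtracts each first-occurrence index, a reverse pass with a fresh seen-set adds each last-occurrence index.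
import Mathlib
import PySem

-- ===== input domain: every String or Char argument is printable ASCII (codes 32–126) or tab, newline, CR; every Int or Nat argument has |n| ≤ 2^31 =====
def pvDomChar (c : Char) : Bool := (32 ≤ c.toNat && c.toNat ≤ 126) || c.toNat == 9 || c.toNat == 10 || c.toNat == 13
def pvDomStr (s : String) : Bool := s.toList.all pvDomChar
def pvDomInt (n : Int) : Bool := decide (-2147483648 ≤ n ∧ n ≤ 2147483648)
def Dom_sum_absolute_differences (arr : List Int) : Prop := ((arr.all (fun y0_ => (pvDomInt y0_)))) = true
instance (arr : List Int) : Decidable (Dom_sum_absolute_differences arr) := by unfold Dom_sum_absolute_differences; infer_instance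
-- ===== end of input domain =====

-- B replaces A's two index dicts and final items loop by signed accumulation over a forward
-- and a reverse pass with seen-sets (alternative decomposition, same O(n) cost).

-- ===== PORT A =====
def sum_absolute_differences (arr : List Int) : Int :=
  let st := (PySem.List.enumerate arr).foldl
    (fun (p : PySem.Dict Int Int × PySem.Dict Int Int) iv =>
      ((if p.1.contains iv.2 then p.1 else p.1.insert iv.2 iv.1), p.2.insert iv.2 iv.1))
    (PySem.Dict.empty, PySem.Dict.empty)
  st.1.items.foldl (fun t pr => t + |st.2.getD pr.1 0 - pr.2|) 0

-- ===== PORT B =====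
def sum_absolute_differences_alt (arr : List Int) : Int :=
  let s1 := (PySem.List.enumerate arr).foldl
    (fun (p : PySem.Set Int × Int) iv =>
      if PySem.Set.contains p.1 iv.2 then p else (PySem.Set.add p.1 iv.2, p.2 - iv.1))
    (PySem.Set.empty, 0)
  let s2 := (PySem.List.enumerate arr).reverse.foldl
    (fun (p : PySem.Set Int × Int) iv =>
      if PySem.Set.contains p.1 iv.2 then p else (PySem.Set.add p.1 iv.2, p.2 + iv.1))
    (PySem.Set.empty, s1.2)
  s2.2

-- ===== PRECONDITION & SPEC =====
def Spec_sum_absolute_differences (arr : List Int) (out : Int) : Prop := out = sum_absolute_differences_alt arr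
instance (arr : List Int) (out : Int) : Decidable (Spec_sum_absolute_differences arr out) := by unfold Spec_sum_absolute_differences; infer_instance

-- ===== CLAIM (what is proved, stated in full; the proofs are below) =====
def Claim_equal_sum_absolute_differences : Prop := ∀ (arr : List Int), Dom_sum_absolute_differences arr → Spec_sum_absolute_differences arr (sum_absolute_differences arr)

-- ===== LEMMAS AND PROOFS =====

-- first index carrying value v in an (index, value) list, default d
def firstIdxD (l : List (Int × Int)) (v d : Int) : Int :=
  match l with
  | [] => d
  | (i, x) :: r => if x = v then i else firstIdxD r v d

-- last index carrying value v, default d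
def lastIdxD (l : List (Int × Int)) (v d : Int) : Int :=
  match l with
  | [] => d
  | (i, x) :: r => lastIdxD r v (if x = v then i else d)

-- indices at the first occurrence w.r.t. seen-set s, summed
def fsum (l : List (Int × Int)) (s : PySem.Set Int) : Int :=
  match l with
  | [] => 0
  | (i, x) :: r => (if PySem.Set.contains s x then 0 else i) + fsum r (PySem.Set.add s x)

-- the new distinct values contributed beyond seen-set s, in order
def news (xs : List Int) (s : PySem.Set Int) : List Int :=
  match xs with
  | [] => []
  | x :: r => if PySem.Set.contains s x then news r s else x :: news r (PySem.Set.add s x)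

theorem mem_news {xs : List Int} {s : PySem.Set Int} {v : Int} (h : v ∈ news xs s) : v ∉ s := by
  induction xs generalizing s with
  | nil => simp [news] at h
  | cons x r ih =>
    simp only [news] at h
    by_cases hx : x ∈ s
    · simp only [PySem.Set.contains_iff, if_pos hx] at h
      exact ih h
    · simp only [PySem.Set.contains_iff, if_neg hx] at h
      rcases List.mem_cons.1 h with rfl | h'
      · exact hx
      · intro hv
        exact (ih h') ((PySem.Set.mem_add _ _ _).2 (Or.inl hv))

theorem update_eq_append_news (xs : List Int) (s : PySem.Set Int) :
    PySem.Set.update s xs = s ++ news xs s := by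
  induction xs generalizing s with
  | nil => simp [news, PySem.Set.update]
  | cons x r ih =>
    rw [PySem.Set.update_cons, news]
    by_cases hx : PySem.Set.contains s x
    · rw [if_pos hx, PySem.Set.add_of_mem ((PySem.Set.contains_iff s x).1 hx), ih]
    · have hx' : x ∉ s := fun hm => hx ((PySem.Set.contains_iff s x).2 hm)
      rw [if_neg hx, PySem.Set.add_of_not_mem hx', ih, List.append_assoc]
      rfl

theorem news_nil_left (xs : List Int) : news xs PySem.Set.empty = PySem.Set.ofList xs := by
  have := update_eq_append_news xs PySem.Set.empty
  rw [PySem.Set.update_empty] at this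
  simpa [PySem.Set.empty] using this.symm

theorem fsum_eq (l : List (Int × Int)) (s : PySem.Set Int) :
    fsum l s = ((news (l.map (·.2)) s).map (fun v => firstIdxD l v 0)).sum := by
  induction l generalizing s with
  | nil => simp [fsum, news]
  | cons p r ih =>
    obtain ⟨i, x⟩ := p
    simp only [fsum, List.map_cons, news]
    by_cases hx : PySem.Set.contains s x
    · rw [if_pos hx, if_pos hx, PySem.Set.add_of_mem ((PySem.Set.contains_iff s x).1 hx),
        ih, zero_add]
      refine congrArg List.sum (List.map_congr_left (fun v hv => ?_))
      have hvs : v ∉ s := mem_news hv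
      have hxv : x ≠ v := fun h => hvs (h ▸ (PySem.Set.contains_iff s x).1 hx)
      simp [firstIdxD, hxv]
    · rw [if_neg hx, if_neg hx, ih]
      simp only [List.map_cons, List.sum_cons]
      have h1 : firstIdxD ((i, x) :: r) x 0 = i := by simp [firstIdxD]
      rw [h1]
      refine congrArg (fun z => i + z) (congrArg List.sum (List.map_congr_left (fun v hv => ?_)))

      have hvs : v ∉ PySem.Set.add s x := mem_news hv
      have hxv : x ≠ v := fun h => hvs ((PySem.Set.mem_add _ _ _).2 (Or.inr h.symm))
      simp [firstIdxD, hxv]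

-- B's two folds
theorem fold_minus (l : List (Int × Int)) (s : PySem.Set Int) (t : Int) :
    (l.foldl (fun (p : PySem.Set Int × Int) iv =>
      if PySem.Set.contains p.1 iv.2 then p else (PySem.Set.add p.1 iv.2, p.2 - iv.1)) (s, t)).2
    = t - fsum l s := by
  induction l generalizing s t with
  | nil => simp [fsum]
  | cons p r ih =>
    obtain ⟨i, x⟩ := p
    simp only [List.foldl_cons, fsum]
    by_cases hx : PySem.Set.contains s x
    · simp only [hx, if_pos]
      rw [ih, PySem.Set.add_of_mem ((PySem.Set.contains_iff _ _).1 hx)]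
      ring
    · simp only [hx, Bool.false_eq_true, if_false]
      rw [ih]; ring

theorem fold_plus (l : List (Int × Int)) (s : PySem.Set Int) (t : Int) :
    (l.foldl (fun (p : PySem.Set Int × Int) iv =>
      if PySem.Set.contains p.1 iv.2 then p else (PySem.Set.add p.1 iv.2, p.2 + iv.1)) (s, t)).2
    = t + fsum l s := by
  induction l generalizing s t with
  | nil => simp [fsum]
  | cons p r ih =>
    obtain ⟨i, x⟩ := p
    simp only [List.foldl_cons, fsum]
    by_cases hx : PySem.Set.contains s x
    · simp only [hx, if_pos]
      rw [ih, PySem.Set.add_of_mem ((PySem.Set.contains_iff _ _).1 hx)]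
      ring
    · simp only [hx, Bool.false_eq_true, if_false]
      rw [ih]; ring

-- firstIdxD over append / reverse
theorem firstIdxD_append (a b : List (Int × Int)) (v d : Int) :
    firstIdxD (a ++ b) v d = firstIdxD a v (firstIdxD b v d) := by
  induction a with
  | nil => simp [firstIdxD]
  | cons p r ih =>
    obtain ⟨i, x⟩ := p
    by_cases h : x = v <;> simp [firstIdxD, h, ih]

theorem firstIdxD_reverse (l : List (Int × Int)) (v d : Int) :
    firstIdxD l.reverse v d = lastIdxD l v d := by
  induction l generalizing d with
  | nil => simp [firstIdxD, lastIdxD]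
  | cons p r ih =>
    obtain ⟨i, x⟩ := p
    rw [List.reverse_cons, firstIdxD_append, ih]
    simp [firstIdxD, lastIdxD]

-- A's dict folds
def foldFirst (l : List (Int × Int)) (d : PySem.Dict Int Int) : PySem.Dict Int Int :=
  l.foldl (fun d iv => if d.contains iv.2 then d else d.insert iv.2 iv.1) d

def foldLast (l : List (Int × Int)) (d : PySem.Dict Int Int) : PySem.Dict Int Int :=
  l.foldl (fun d iv => d.insert iv.2 iv.1) d

theorem foldAB (l : List (Int × Int)) (d1 d2 : PySem.Dict Int Int) :
    l.foldl (fun (p : PySem.Dict Int Int × PySem.Dict Int Int) iv =>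
      ((if p.1.contains iv.2 then p.1 else p.1.insert iv.2 iv.1), p.2.insert iv.2 iv.1)) (d1, d2)
    = (foldFirst l d1, foldLast l d2) := by
  induction l generalizing d1 d2 with
  | nil => rfl
  | cons p r ih =>
    rw [List.foldl_cons, ih]
    rfl

theorem getD_foldLast (l : List (Int × Int)) (d : PySem.Dict Int Int) (v : Int) :
    (foldLast l d).getD v 0 = lastIdxD l v (d.getD v 0) := by
  induction l generalizing d with
  | nil => simp [foldLast, lastIdxD]
  | cons p r ih =>
    obtain ⟨i, x⟩ := p
    simp only [foldLast, List.foldl_cons, lastIdxD] at *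
    rw [ih]
    congr 1
    rw [PySem.Dict.getD_insert]
    by_cases h : v = x
    · subst h; simp
    · rw [if_neg h, if_neg (fun hh => h (Eq.symm hh))]

theorem getD_foldFirst (l : List (Int × Int)) (d : PySem.Dict Int Int) (v : Int) :
    (foldFirst l d).getD v 0 =
      if d.contains v then d.getD v 0 else firstIdxD l v 0 := by
  induction l generalizing d with
  | nil =>
    simp only [foldFirst, List.foldl_nil, firstIdxD]
    by_cases hv : d.contains v
    · rw [if_pos hv]
    · rw [if_neg hv, PySem.Dict.getD_of_not_contains]
      simpa using hv
  | cons p r ih =>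
    obtain ⟨i, x⟩ := p
    simp only [foldFirst, List.foldl_cons] at *
    by_cases hx : d.contains x
    · rw [if_pos hx, ih]
      by_cases hv : d.contains v
      · rw [if_pos hv, if_pos hv]
      · have hxv : x ≠ v := fun h => hv (h ▸ hx)
        rw [if_neg hv, if_neg hv]
        simp [firstIdxD, hxv]
    · rw [if_neg hx, ih]
      by_cases hv : v = x
      · subst hv
        rw [if_pos (PySem.Dict.contains_insert_self _ _ _), if_neg (by simpa using hx),
          PySem.Dict.getD_insert_self]
        simp [firstIdxD]
      · have h1 : (d.insert x i).contains v = d.contains v := by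
          rw [PySem.Dict.contains_insert]
          simp [hv]
        rw [h1, PySem.Dict.getD_insert]
        by_cases hv2 : d.contains v
        · rw [if_pos hv2, if_pos hv2, if_neg hv]
        · rw [if_neg hv2, if_neg hv2]
          have hxv : x ≠ v := fun h => hv (Eq.symm h)
          simp [firstIdxD, hxv]

theorem keys_foldFirst (l : List (Int × Int)) (d : PySem.Dict Int Int) :
    (foldFirst l d).keys = PySem.Set.update d.keys (l.map (·.2)) := by
  induction l generalizing d with
  | nil => simp [foldFirst, PySem.Set.update]
  | cons p r ih =>
    obtain ⟨i, x⟩ := p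
    simp only [foldFirst, List.foldl_cons, List.map_cons, PySem.Set.update_cons] at *
    by_cases hx : d.contains x
    · have hxk : x ∈ d.keys := (PySem.Dict.contains_iff_mem_keys d x).1 hx
      rw [if_pos hx, ih, PySem.Set.add_of_mem hxk]
    · have hxk : x ∉ d.keys := fun h => hx ((PySem.Dict.contains_iff_mem_keys d x).2 h)
      rw [if_neg hx, ih, PySem.Dict.keys_insert_of_not_contains,
        PySem.Set.add_of_not_mem hxk]
      simpa using hx

-- sum of differences
theorem sum_map_sub (xs : List Int) (f g : Int → Int) :
    (xs.map (fun v => f v - g v)).sum = (xs.map f).sum - (xs.map g).sum := by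
  induction xs with
  | nil => simp
  | cons x r ih => simp [ih]; ring

-- the last index is the default or one of the list's indices
theorem lastIdxD_cases (l : List (Int × Int)) (v d : Int) :
    lastIdxD l v d = d ∨ lastIdxD l v d ∈ l.map (·.1) := by
  induction l generalizing d with
  | nil => simp [lastIdxD]
  | cons p r ih =>
    obtain ⟨i, x⟩ := p
    simp only [lastIdxD, List.map_cons]
    rcases ih (if x = v then i else d) with h | h
    · by_cases hxv : x = v
      · rw [if_pos hxv] at h ⊢
        rw [h]
        exact Or.inr (List.mem_cons_self)
      · rw [if_neg hxv] at h ⊢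
        rw [h]
        exact Or.inl rfl
    · exact Or.inr (List.mem_cons_of_mem _ h)

theorem first_le_last (l : List (Int × Int)) (v : Int)
    (hs : l.Pairwise (fun p q => p.1 ≤ q.1)) (hv : v ∈ l.map (·.2)) :
    firstIdxD l v 0 ≤ lastIdxD l v 0 := by
  induction l with
  | nil => simp at hv
  | cons p r ih =>
    obtain ⟨i, x⟩ := p
    rw [List.pairwise_cons] at hs
    by_cases h : x = v
    · simp only [firstIdxD, lastIdxD, if_pos h]
      rcases lastIdxD_cases r v i with hc | hc
      · rw [hc]
      · rcases List.mem_map.1 hc with ⟨q, hq, hq2⟩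
        rw [← hq2]
        exact hs.1 q hq
    · have hv' : v ∈ r.map (·.2) := by
        rcases List.mem_map.1 hv with ⟨q, hq, hq2⟩
        rcases List.mem_cons.1 hq with rfl | hq'
        · exact absurd hq2 h
        · exact List.mem_map.2 ⟨q, hq', hq2⟩
      simp only [firstIdxD, lastIdxD, if_neg h]
      exact ih hs.2 hv'

theorem perm_dedup_reverse (xs : List Int) :
    (PySem.Set.ofList xs.reverse).Perm (PySem.Set.ofList xs) := by
  apply (List.perm_ext_iff_of_nodup (PySem.Set.nodup_ofList _) (PySem.Set.nodup_ofList _)).2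
  intro v
  simp [PySem.Set.mem_ofList]

-- ===== VERDICT (by name: the statement is the Claim_ definition above) =====
theorem sum_absolute_differences_spec : Claim_equal_sum_absolute_differences := by
  intro arr _
  unfold Spec_sum_absolute_differences
  have hsnd : (PySem.List.enumerate arr).map (·.2) = arr := PySem.List.map_snd_enumerate arr 0
  have hA : sum_absolute_differences arr
      = ((PySem.Set.ofList arr).map
          (fun v => |lastIdxD (PySem.List.enumerate arr) v 0
                     - firstIdxD (PySem.List.enumerate arr) v 0|)).sum := by
    unfold sum_absolute_differences
    rw [foldAB]
    have hkeys : (foldFirst (PySem.List.enumerate arr) PySem.Dict.empty).keys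
        = PySem.Set.ofList arr := by
      rw [keys_foldFirst, PySem.Dict.keys_empty, PySem.Set.update_nil_left, hsnd]
    have hnd : (foldFirst (PySem.List.enumerate arr) PySem.Dict.empty).keys.Nodup := by
      rw [hkeys]; exact PySem.Set.nodup_ofList _
    rw [PySem.List.foldl_add, PySem.Dict.items_eq_map_keys _ hnd 0, hkeys, zero_add,
      List.map_map]
    refine congrArg List.sum (List.map_congr_left (fun v hv => ?_))
    simp only [Function.comp_apply]
    rw [getD_foldFirst, getD_foldLast, PySem.Dict.getD_empty]
    simp [PySem.Dict.contains_empty]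
  have habs : sum_absolute_differences arr
      = ((PySem.Set.ofList arr).map
          (fun v => lastIdxD (PySem.List.enumerate arr) v 0)).sum
        - ((PySem.Set.ofList arr).map
          (fun v => firstIdxD (PySem.List.enumerate arr) v 0)).sum := by
    rw [hA, ← sum_map_sub]
    refine congrArg List.sum (List.map_congr_left (fun v hv => ?_))
    have hvin : v ∈ (PySem.List.enumerate arr).map (·.2) := by
      rw [hsnd]; exact (PySem.Set.mem_ofList _ _).1 hv
    have hle := first_le_last (PySem.List.enumerate arr) v
      ((PySem.List.pairwise_lt_enumerate arr 0).imp (fun h => le_of_lt h)) hvin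
    exact abs_of_nonneg (by omega)
  have hsndr : ((PySem.List.enumerate arr).reverse).map (·.2) = arr.reverse := by
    rw [List.map_reverse, hsnd]
  have hB : sum_absolute_differences_alt arr
      = ((PySem.Set.ofList arr).map
          (fun v => lastIdxD (PySem.List.enumerate arr) v 0)).sum
        - ((PySem.Set.ofList arr).map
          (fun v => firstIdxD (PySem.List.enumerate arr) v 0)).sum := by
    unfold sum_absolute_differences_alt
    rw [fold_plus, fold_minus, fsum_eq, fsum_eq, hsnd, hsndr, news_nil_left, news_nil_left]
    have h2 : ((PySem.Set.ofList arr.reverse).map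
        (fun v => firstIdxD (PySem.List.enumerate arr).reverse v 0)).sum
        = ((PySem.Set.ofList arr).map
        (fun v => lastIdxD (PySem.List.enumerate arr) v 0)).sum := by
      rw [show (fun v => firstIdxD (PySem.List.enumerate arr).reverse v 0)
            = (fun v => lastIdxD (PySem.List.enumerate arr) v 0) from
          funext (fun v => firstIdxD_reverse _ v 0)]
      exact ((perm_dedup_reverse arr).map _).sum_eq
    rw [h2]; ring
  rw [habs, hB]
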